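-- pv_equiv track=rewrite | github.com/dmitrysadovskii/QAP10 | Olga Aviltseva/hw_8/task_8_3.py | get_min_index
-- ===== SOURCE A (Python) =====
-- def get_min_index(lst: list, operators_list):
--     min_operator_index = -1
--
--     if True in (operator in lst for operator in operators_list):
--         for operator in operators_list:
--             if operator in lst:
--                 index = lst.index(operator)
--
--                 if index < min_operator_index or min_operator_index == -1:
--                     min_operator_index = index
--
--     return min_operator_index
-- ===== SOURCE B (Python) =====
-- def get_min_index(lst: list, operators_list):
--     ops = set(operators_list)
--     for i, x in enumerate(lst):
--         if x in ops:
--             return i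
--     return -1
-- ===== Notes on version B (the rewrite author's own statement) =====
-- stated objective: faster
-- what changed: B makes one pass over lst, returning the first position whose element lies in a prebuilt set of operators, instead of A's per-operator repeated lst.index/membership scans and running minimum.
import Mathlib
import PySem

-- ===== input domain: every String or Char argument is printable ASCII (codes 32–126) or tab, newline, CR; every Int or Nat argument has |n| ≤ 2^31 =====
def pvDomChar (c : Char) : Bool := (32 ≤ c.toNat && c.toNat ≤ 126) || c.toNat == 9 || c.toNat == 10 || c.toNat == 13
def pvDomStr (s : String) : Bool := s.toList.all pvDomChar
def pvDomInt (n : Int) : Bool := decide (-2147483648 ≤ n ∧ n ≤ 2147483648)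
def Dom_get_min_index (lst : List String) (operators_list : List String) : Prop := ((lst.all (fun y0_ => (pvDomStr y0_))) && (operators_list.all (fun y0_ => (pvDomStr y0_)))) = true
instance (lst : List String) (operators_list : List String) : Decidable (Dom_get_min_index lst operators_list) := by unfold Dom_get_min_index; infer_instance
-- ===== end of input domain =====

-- B replaces A's operator-driven repeated lst.index scans with one pass over lst
-- against a prebuilt operator set (objective: faster).

-- ===== PORT A =====
-- literal port of A: guard 'True in (op in lst for op in ops)', then a fold over
-- operators_list keeping the running minimum index with -1 as "not found".
def get_min_index (lst : List String) (operators_list : List String) : Int :=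
  let min0 : Int := -1
  if operators_list.any (fun op => lst.contains op) then
    operators_list.foldl (fun m op =>
      if lst.contains op then
        match PySem.List.index? lst op with
        | some idx => if (idx : Int) < m ∨ m = -1 then (idx : Int) else m
        | none => m   -- unreachable: guarded by 'op in lst', so lst.index cannot raise
      else m) min0
  else min0

-- ===== PORT B =====
-- Source B's scan: walk lst with a counter, return the first index whose element is
-- in the set of operators; -1 if the walk ends.
def altScan (ops : PySem.Set String) : List String → Nat → Int
  | [], _ => -1
  | x :: xs, i => if PySem.Set.contains ops x then (i : Int) else altScan ops xs (i + 1)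

def get_min_index_alt (lst : List String) (operators_list : List String) : Int :=
  altScan (PySem.Set.ofList operators_list) lst 0

-- ===== PRECONDITION & SPEC =====
def Spec_get_min_index (lst : List String) (operators_list : List String) (out : Int) : Prop := out = get_min_index_alt lst operators_list
instance (lst : List String) (operators_list : List String) (out : Int) : Decidable (Spec_get_min_index lst operators_list out) := by unfold Spec_get_min_index; infer_instance

-- ===== CLAIM (what is proved, stated in full; the proofs are below) =====
def Claim_equal_get_min_index : Prop := ∀ (lst : List String) (operators_list : List String), Dom_get_min_index lst operators_list → Spec_get_min_index lst operators_list (get_min_index lst operators_list)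

-- ===== LEMMAS AND PROOFS =====

-- option-min with none as "no candidate"
def omin : Option Nat → Option Nat → Option Nat
  | none, b => b
  | a, none => a
  | some x, some y => some (min x y)

-- candidate of one operator: its first index in lst, if present
def cand (lst : List String) (op : String) : Option Nat :=
  if lst.contains op then PySem.List.index? lst op else none

-- minimum candidate over the operator list
def minCand (lst : List String) : List String → Option Nat
  | [] => none
  | op :: rest => omin (cand lst op) (minCand lst rest)

-- first index in lst of an element of ops
def firstHit (ops : List String) : List String → Option Nat
  | [] => none
  | x :: xs => if ops.contains x then some 0 else (firstHit ops xs).map (· + 1)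

-- encode Option Nat as A's Int with -1 sentinel
def enc : Option Nat → Int
  | none => -1
  | some k => (k : Int)

theorem omin_none_right (a : Option Nat) : omin a none = a := by
  cases a <;> rfl

theorem omin_zero_left (b : Option Nat) : omin (some 0) b = some 0 := by
  cases b with
  | none => rfl
  | some y => show some (min 0 y) = some 0; simp

theorem omin_some_zero (a : Option Nat) : omin a (some 0) = some 0 := by
  cases a with
  | none => rfl
  | some x => show some (min x 0) = some 0; simp

theorem omin_map_succ (a b : Option Nat) :
    omin (a.map (· + 1)) (b.map (· + 1)) = (omin a b).map (· + 1) := by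
  cases a with
  | none => cases b <;> rfl
  | some x =>
    cases b with
    | none => rfl
    | some y =>
      show some (min (x + 1) (y + 1)) = some (min x y + 1)
      congr 1
      omega

theorem omin_assoc (a b c : Option Nat) : omin (omin a b) c = omin a (omin b c) := by
  cases a <;> cases b <;> cases c <;> simp [omin, Nat.min_assoc]

-- A's fold step is omin with the candidate (plain Option form)
theorem stepO_eq_omin (lst : List String) (o : Option Nat) (op : String) :
    (if lst.contains op then
      match PySem.List.index? lst op with
      | some idx => some (match o with | none => idx | some m => min idx m)
      | none => o
     else o) = omin o (cand lst op) := by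
  unfold cand
  by_cases h : lst.contains op = true
  · rw [if_pos h, if_pos h]
    cases hidx : PySem.List.index? lst op with
    | none => cases o <;> rfl
    | some idx =>
      cases o with
      | none => rfl
      | some m =>
        show some (min idx m) = some (min m idx)
        rw [Nat.min_comm]
  · rw [if_neg h, if_neg h, omin_none_right]

-- A's fold step, in encoded form
theorem step_enc (lst : List String) (o : Option Nat) (op : String) :
    (if lst.contains op then
      match PySem.List.index? lst op with
      | some idx => if (idx : Int) < enc o ∨ enc o = -1 then (idx : Int) else enc o
      | none => enc o
     else enc o) = enc (omin o (cand lst op)) := by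
  rw [← stepO_eq_omin]
  by_cases h : lst.contains op = true
  · rw [if_pos h, if_pos h]
    cases hidx : PySem.List.index? lst op with
    | none => rfl
    | some idx =>
      cases o with
      | none => simp [enc]
      | some m =>
        simp only [enc]
        by_cases hlt : idx < m
        · rw [if_pos (Or.inl (by exact_mod_cast hlt))]
          push_cast
          omega
        · rw [if_neg (by push_neg; exact ⟨by exact_mod_cast Nat.le_of_not_lt hlt, by omega⟩)]
          push_cast
          omega
  · rw [if_neg h, if_neg h]

-- fold the encoded invariant through the operator list
theorem foldA_eq (lst : List String) (ops : List String) (o : Option Nat) :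
    ops.foldl (fun m op =>
      if lst.contains op then
        match PySem.List.index? lst op with
        | some idx => if (idx : Int) < m ∨ m = -1 then (idx : Int) else m
        | none => m
      else m) (enc o) = enc (ops.foldl (fun o op => omin o (cand lst op)) o) := by
  induction ops generalizing o with
  | nil => rfl
  | cons op rest ih =>
    simp only [List.foldl_cons]
    rw [step_enc lst o op, ih]

theorem foldA_none (lst : List String) (ops : List String) :
    ops.foldl (fun m op =>
      if lst.contains op then
        match PySem.List.index? lst op with
        | some idx => if (idx : Int) < m ∨ m = -1 then (idx : Int) else m
        | none => m
      else m) (-1) = enc (ops.foldl (fun o op => omin o (cand lst op)) none) :=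
  foldA_eq lst ops none

theorem foldO_eq_minCand (lst : List String) (ops : List String) (o : Option Nat) :
    ops.foldl (fun o op => omin o (cand lst op)) o = omin o (minCand lst ops) := by
  induction ops generalizing o with
  | nil => simp [minCand, omin_none_right]
  | cons op rest ih =>
    simp only [List.foldl_cons, minCand]
    rw [ih, omin_assoc]

-- pushing one element of lst through one candidate
theorem cand_cons (x : String) (xs : List String) (op : String) :
    cand (x :: xs) op = if op = x then some 0 else (cand xs op).map (· + 1) := by
  by_cases hx : op = x
  · subst hx
    rw [if_pos rfl]
    unfold cand
    rw [if_pos (by simp : (op :: xs).contains op = true)]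
    rw [PySem.List.index?_cons_self]
  · rw [if_neg hx]
    unfold cand
    by_cases hmem : xs.contains op = true
    · have hop : op ∈ xs := by simpa using hmem
      rw [if_pos (by simp [hop] : (x :: xs).contains op = true), if_pos hmem]
      rw [PySem.List.index?_cons_of_ne xs (fun h => hx h.symm)]
    · have hopn : op ∉ xs := by simpa using hmem
      rw [if_neg (by simp [hx, hopn] : ¬ ((x :: xs).contains op = true)), if_neg hmem]
      rfl

-- pushing one element of lst through minCand
theorem minCand_cons (x : String) (xs : List String) (ops : List String) :
    minCand (x :: xs) ops =
      if ops.contains x then some 0 else (minCand xs ops).map (· + 1) := by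
  induction ops with
  | nil => simp [minCand]
  | cons op rest ih =>
    simp only [minCand]
    rw [cand_cons, ih]
    by_cases hox : op = x
    · subst hox
      rw [if_pos rfl, if_pos (by simp : (op :: rest).contains op = true)]
      exact omin_zero_left _
    · rw [if_neg hox]
      have hbx : (x == op) = false := beq_eq_false_iff_ne.mpr (fun h => hox h.symm)
      have hcc : (op :: rest).contains x = rest.contains x := by
        simp only [List.contains_cons, hbx, Bool.false_or]
      rw [hcc]
      by_cases hr : rest.contains x = true
      · rw [if_pos hr, if_pos hr]
        exact omin_some_zero _
      · rw [if_neg hr, if_neg hr]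
        exact omin_map_succ _ _

theorem minCand_eq_firstHit (ops : List String) (lst : List String) :
    minCand lst ops = firstHit ops lst := by
  induction lst with
  | nil =>
    induction ops with
    | nil => rfl
    | cons op rest ih => simp [minCand, cand, ih, omin, firstHit]
  | cons x xs ih =>
    rw [minCand_cons, ih]
    rfl

theorem altScan_eq (ops : PySem.Set String) (lst : List String) (i : Nat) :
    altScan ops lst i =
      match firstHit ops lst with
      | some j => ((i + j : Nat) : Int)
      | none => -1 := by
  induction lst generalizing i with
  | nil => rfl
  | cons x xs ih =>
    by_cases hx : x ∈ (ops : List String)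
    · simp [altScan, firstHit, PySem.Set.contains, hx]
    · have hb : ¬ (PySem.Set.contains ops x = true) := by
        simp [PySem.Set.contains, hx]
      have hc : ¬ (List.contains ops x = true) := by simp [hx]
      simp only [altScan, firstHit]
      rw [if_neg hb, if_neg hc, ih (i + 1)]
      cases firstHit ops xs with
      | none => rfl
      | some j =>
        show ((i + 1 + j : Nat) : Int) = ((i + (j + 1) : Nat) : Int)
        congr 1
        omega

-- if no operator occurs in lst, there is no first hit
theorem firstHit_none_of_no_hit (ops lst : List String)
    (h : ∀ op ∈ ops, op ∉ lst) : firstHit ops lst = none := by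
  induction lst with
  | nil => rfl
  | cons x xs ih =>
    have hx : ops.contains x = false := by
      by_contra hc
      have : x ∈ ops := by simpa using Bool.of_not_eq_false hc
      exact (h x this) (List.mem_cons_self)
    rw [firstHit, hx]
    simp only [Bool.false_eq_true, if_false]
    rw [ih (fun op hop hmem => h op hop (List.mem_cons_of_mem _ hmem))]
    rfl

-- building the set keeps membership, hence firstHit is unchanged
theorem firstHit_ofList (ops lst : List String) :
    firstHit (PySem.Set.ofList ops) lst = firstHit ops lst := by
  induction lst with
  | nil => rfl
  | cons x xs ih =>
    have hmem : List.contains (PySem.Set.ofList ops) x = List.contains ops x := by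
      by_cases h : x ∈ ops
      · have h2 : x ∈ (PySem.Set.ofList ops : List String) := by
          first
            | exact (PySem.Set.mem_ofList).mpr h
            | simpa [PySem.Set.mem_ofList] using h
        simp [h, h2]
      · have h2 : x ∉ (PySem.Set.ofList ops : List String) := by
          first
            | exact fun hc => h ((PySem.Set.mem_ofList).mp hc)
            | simpa [PySem.Set.mem_ofList] using h
        simp [h, h2]
    rw [firstHit, firstHit, hmem, ih]

-- ===== VERDICT (by name: the statement is the Claim_ definition above) =====
theorem get_min_index_spec : Claim_equal_get_min_index := by
  intro lst ops _
  unfold Spec_get_min_index get_min_index get_min_index_alt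
  rw [altScan_eq, firstHit_ofList]
  by_cases hg : ops.any (fun op => lst.contains op) = true
  · simp only [hg, if_true]
    rw [foldA_none, foldO_eq_minCand, minCand_eq_firstHit]
    cases h : firstHit ops lst with
    | none => rfl
    | some j => simp [omin, enc]
  · simp only [hg, Bool.false_eq_true, if_false]
    have hnone : firstHit ops lst = none := by
      apply firstHit_none_of_no_hit
      intro op hop hmem
      apply hg
      simp only [List.any_eq_true]
      exact ⟨op, hop, by simpa using hmem⟩
    rw [hnone]
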